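-- pv_equiv track=rewrite | github.com/OlgaAlekhina/algorithms | reverseSubstring.py | reverse_substring
-- ===== SOURCE A (Python) =====
-- from collections import defaultdict
--
-- def reverse_substring(s: str) -> bool:
--     s_dict = defaultdict(set)
--     for i in range(len(s) - 1):
--         s_dict[s[i]].add(s[i + 1])
--     for item in s_dict.items():
--         for char in item[1]:
--             if s_dict.get(char) and item[0] in s_dict.get(char):
--                 return True
--
--     return False
-- ===== SOURCE B (Python) =====
-- def reverse_substring(s: str) -> bool:
--     # For each adjacent pair, search the whole string for the reversed 2-gram.
--     return any(s[i + 1] + s[i] in s for i in range(len(s) - 1))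
-- ===== Notes on version B (the rewrite author's own statement) =====
-- stated objective: alternative
-- what changed: Drops A's defaultdict-of-sets adjacency map entirely: B substring-searches the reversed 2-gram s[i+1]+s[i] in s for each position i, with any() short-circuiting on the first hit.
import Mathlib
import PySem

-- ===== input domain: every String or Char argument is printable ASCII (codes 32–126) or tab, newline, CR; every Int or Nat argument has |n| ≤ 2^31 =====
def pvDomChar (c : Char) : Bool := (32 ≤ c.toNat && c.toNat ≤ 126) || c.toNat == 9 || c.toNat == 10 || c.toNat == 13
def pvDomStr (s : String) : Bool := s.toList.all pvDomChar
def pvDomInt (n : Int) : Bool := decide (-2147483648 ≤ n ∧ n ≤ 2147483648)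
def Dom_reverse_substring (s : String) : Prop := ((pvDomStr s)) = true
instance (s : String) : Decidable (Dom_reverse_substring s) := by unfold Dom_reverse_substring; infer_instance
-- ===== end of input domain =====

-- B drops A's adjacency map entirely: for each position i it substring-searches the
-- reversed 2-gram s[i+1]+s[i] in s (objective: alternative algorithm, similar size).

-- ===== PORT A =====
def reverse_substring (s : String) : Bool :=
  let cs := s.toList
  -- s_dict = defaultdict(set); for i in range(len(s)-1): s_dict[s[i]].add(s[i+1])
  let d : PySem.Dict Char (PySem.Set Char) :=
    (PySem.List.pyRange 0 (PySem.Str.len s - 1) 1).foldl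
      (fun d i => d.modify (PySem.List.pyGetD cs i ' ') PySem.Set.empty
          (fun st => PySem.Set.add st (PySem.List.pyGetD cs (i + 1) ' ')))
      PySem.Dict.empty
  -- for item in s_dict.items(): for char in item[1]: if s_dict.get(char) and item[0] in s_dict.get(char): return True
  -- (early return on a Bool result = List.any; the set-iteration order cannot affect it)
  d.items.any (fun item =>
    item.2.any (fun c =>
      match d.get? c with
      | none => false
      | some st => !st.isEmpty && PySem.Set.contains st item.1))

-- ===== PORT B =====
def reverse_substring_alt (s : String) : Bool :=
  let cs := s.toList
  -- any(s[i+1] + s[i] in s for i in range(len(s)-1)): the 2-char string s[i+1]+s[i]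
  -- is the code-point list [cs[i+1], cs[i]]; 'in' is PySem substring containment
  (PySem.List.pyRange 0 (PySem.Str.len s - 1) 1).any (fun i =>
    PySem.Chars.isIn [PySem.List.pyGetD cs (i + 1) ' ', PySem.List.pyGetD cs i ' '] cs)

-- ===== PRECONDITION & SPEC =====
def Spec_reverse_substring (s : String) (out : Bool) : Prop := out = reverse_substring_alt s
instance (s : String) (out : Bool) : Decidable (Spec_reverse_substring s out) := by unfold Spec_reverse_substring; infer_instance

-- ===== CLAIM (what is proved, stated in full; the proofs are below) =====
def Claim_equal_reverse_substring : Prop := ∀ (s : String), Dom_reverse_substring s → Spec_reverse_substring s (reverse_substring s)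

-- ===== LEMMAS AND PROOFS =====

-- the indexed comprehension over range(len-1) is the list of adjacent pairs
lemma pairsList (cs : List Char) :
    (PySem.List.pyRange 0 ((cs.length : Int) - 1) 1).map
      (fun i => (PySem.List.pyGetD cs i ' ', PySem.List.pyGetD cs (i + 1) ' '))
      = cs.zip cs.tail := by
  apply List.ext_getElem
  · simp [PySem.List.length_pyRange_one, List.length_zip, List.length_tail]
  · intro k h1 h2
    have hk : k < cs.length - 1 := by
      simp [PySem.List.length_pyRange_one] at h1; omega
    have hkl : k < cs.length := by omega
    have hk1 : k + 1 < cs.length := by omega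
    simp [PySem.List.getElem_pyRange_one, List.getElem_zip, List.getElem_tail]
    have hc : ((k : Int) + 1) = (((k + 1 : Nat)) : Int) := by push_cast; ring
    constructor
    · simp [List.getElem?_eq_getElem hkl]
    · simp only [hc, PySem.List.pyGetD_natCast]
      simp [List.getD_eq_getElem?_getD, List.getElem?_eq_getElem hk1]

-- invariant of A's building loop: membership in a bucket = pair seen (or already in the start dict)
lemma mem_getD_build (l : List (Char × Char)) (d : PySem.Dict Char (PySem.Set Char)) (a b : Char) :
    b ∈ (l.foldl (fun d p => d.modify p.1 PySem.Set.empty (fun st => PySem.Set.add st p.2)) d).getD a PySem.Set.empty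
      ↔ b ∈ d.getD a PySem.Set.empty ∨ (a, b) ∈ l := by
  induction l generalizing d with
  | nil => simp
  | cons p l ih =>
    obtain ⟨pa, pb⟩ := p
    simp only [List.foldl_cons, ih, PySem.Dict.getD_modify, List.mem_cons]
    by_cases hp : a = pa
    · subst hp
      simp [PySem.Set.mem_add, Prod.ext_iff]
      tauto
    · simp [hp, Prod.ext_iff]

-- the guarded lookup in A's inner test, as a total expression over getD
lemma match_get?_eq (d : PySem.Dict Char (PySem.Set Char)) (c a : Char) :
    (match d.get? c with
     | none => false
     | some st => !st.isEmpty && PySem.Set.contains st a)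
      = (!(d.getD c PySem.Set.empty).isEmpty && PySem.Set.contains (d.getD c PySem.Set.empty) a) := by
  cases h : d.get? c with
  | none => simp [PySem.Dict.getD_eq_get?_getD, h, PySem.Set.empty]
  | some st => simp [PySem.Dict.getD_eq_get?_getD, h]

-- characterisation of A's whole computation on an arbitrary pair list
lemma A_core (l : List (Char × Char)) :
    ((l.foldl (fun d p => d.modify p.1 PySem.Set.empty (fun st => PySem.Set.add st p.2)) PySem.Dict.empty).items.any
        (fun item => item.2.any (fun c =>
          match (l.foldl (fun d p => d.modify p.1 PySem.Set.empty (fun st => PySem.Set.add st p.2)) PySem.Dict.empty).get? c with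
          | none => false
          | some st => !st.isEmpty && PySem.Set.contains st item.1)) = true)
      ↔ ∃ a b, (a, b) ∈ l ∧ (b, a) ∈ l := by
  set D := l.foldl (fun d p => d.modify p.1 PySem.Set.empty (fun st => PySem.Set.add st p.2)) PySem.Dict.empty with hD
  have hnd : D.keys.Nodup := by
    rw [hD]
    exact PySem.Dict.nodup_keys_foldl_modify_key l Prod.fst PySem.Set.empty _ PySem.Dict.empty (by simp)
  have hmem : ∀ a b, b ∈ D.getD a PySem.Set.empty ↔ (a, b) ∈ l := by
    intro a b
    rw [hD, mem_getD_build]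
    simp
  rw [PySem.Dict.items_eq_map_keys D hnd PySem.Set.empty, List.any_map]
  simp only [Function.comp, List.any_eq_true, match_get?_eq, Bool.and_eq_true,
    Bool.not_eq_true', PySem.Set.contains_iff, hmem]
  constructor
  · rintro ⟨k, _, c, hkc, _, hck⟩
    exact ⟨k, c, hkc, hck⟩
  · rintro ⟨a, b, hab, hba⟩
    refine ⟨a, ?_, b, hab, ?_, hba⟩
    · rw [hD, PySem.Dict.keys_foldl_modify_key]
      simp only [PySem.Dict.keys_empty, PySem.Set.update_nil_left, PySem.Set.mem_ofList]
      exact List.mem_map_of_mem hab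
    · have : a ∈ D.getD b PySem.Set.empty := (hmem b a).2 hba
      rcases h : (D.getD b PySem.Set.empty).isEmpty with _ | _
      · rfl
      · rw [List.isEmpty_iff] at h
        rw [h] at this
        cases this

-- characterisation of A on the adjacent-pair list
lemma A_iff (s : String) :
    reverse_substring s = true ↔
      ∃ a b, (a, b) ∈ s.toList.zip s.toList.tail ∧ (b, a) ∈ s.toList.zip s.toList.tail := by
  simp only [reverse_substring, PySem.Str.len_eq]
  have hfold :
      List.foldl
        (fun d i => d.modify (PySem.List.pyGetD s.toList i ' ') PySem.Set.empty
          (fun st => st.add (PySem.List.pyGetD s.toList (i + 1) ' ')))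
        PySem.Dict.empty (PySem.List.pyRange 0 ((s.toList.length : Int) - 1) 1)
      = List.foldl (fun d p => d.modify p.1 PySem.Set.empty (fun st => st.add p.2))
          PySem.Dict.empty (s.toList.zip s.toList.tail) := by
    rw [← pairsList s.toList, List.foldl_map]
  rw [hfold]
  exact A_core _

-- a two-element list is an infix exactly when the pair is adjacent (a zip-with-tail member)
lemma infix_pair_iff (cs : List Char) (x y : Char) :
    [x, y] <:+: cs ↔ (x, y) ∈ cs.zip cs.tail := by
  induction cs with
  | nil => simp
  | cons a t ih =>
    cases t with
    | nil =>
      constructor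
      · rintro ⟨p, q, h⟩
        have := congrArg List.length h
        simp at this
        omega
      · simp
    | cons b u =>
      rw [List.infix_cons_iff]
      simp only [List.tail_cons, List.zip_cons_cons, List.mem_cons]
      constructor
      · rintro (⟨r, hr⟩ | h)
        · simp at hr
          left
          exact Prod.ext hr.1 hr.2.1
        · right
          have := ih.1 h
          simpa using this
      · rintro (h | h)
        · left
          obtain ⟨h1, h2⟩ := Prod.ext_iff.1 h
          subst h1; subst h2
          exact ⟨u, rfl⟩
        · right
          exact ih.2 (by simpa using h)

-- characterisation of B on the adjacent-pair list
lemma B_iff (s : String) :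
    reverse_substring_alt s = true ↔
      ∃ a b, (a, b) ∈ s.toList.zip s.toList.tail ∧ (b, a) ∈ s.toList.zip s.toList.tail := by
  have hmap : reverse_substring_alt s
      = ((PySem.List.pyRange 0 ((s.toList.length : Int) - 1) 1).map
          (fun i => (PySem.List.pyGetD s.toList i ' ', PySem.List.pyGetD s.toList (i + 1) ' '))).any
          (fun p => PySem.Chars.isIn [p.2, p.1] s.toList) := by
    simp only [reverse_substring_alt, PySem.Str.len_eq, List.any_map]
    rfl
  rw [hmap, pairsList]
  simp only [List.any_eq_true, PySem.Chars.isIn_iff_infix, infix_pair_iff]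
  constructor
  · rintro ⟨⟨a, b⟩, h1, h2⟩
    exact ⟨a, b, h1, h2⟩
  · rintro ⟨a, b, h1, h2⟩
    exact ⟨(a, b), h1, h2⟩

-- ===== VERDICT (by name: the statement is the Claim_ definition above) =====
theorem reverse_substring_spec : Claim_equal_reverse_substring := by
  intro s _
  unfold Spec_reverse_substring
  rw [Bool.eq_iff_iff, A_iff, B_iff]
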